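-- pv_equiv track=rewrite | github.com/shinsec/rex | rex/crash.py | _segment
-- ===== SOURCE A (Python) =====
-- def _segment(memory_writes):
--     segments = { }
--     memory_writes = sorted(memory_writes)
--
--     if len(memory_writes) == 0:
--         return segments
--
--     current_w_start = memory_writes[0]
--     current_w_end = current_w_start + 1
--
--     for write in memory_writes[1:]:
--         write_start = write
--         write_len = 1
--
--         # segment is completely seperate
--         if write_start > current_w_end:
--             # store the old segment
--             segments[current_w_start] = current_w_end - current_w_start
--
--             # new segment, update start and end
--             current_w_start = write_start
--             current_w_end = write_start + write_len
--         else: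
--             # update the end of the current segment, the segment `write` exists within current
--             current_w_end = max(current_w_end, write_start + write_len)
--
--
--     # write in the last segment
--     segments[current_w_start] = current_w_end - current_w_start
--
--     return segments
-- ===== SOURCE B (Python) =====
-- def _segment(memory_writes):
--     # Hash-set run detection: a value starts a segment iff value-1 is absent
--     # from the set; from each start, walk forward through the set to the end.
--     present = set(memory_writes)
--     segments = {}
--     for start in sorted(x for x in present if x - 1 not in present):
--         end = start
--         while end + 1 in present:
--             end += 1
--         segments[start] = end - start + 1
--     return segments
-- ===== Notes on version B (the rewrite author's own statement) =====
-- stated objective: alternative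
-- what changed: B replaces A's sorted linear merge scan with running start/end state by hash-set run detection: build a set, take as segment starts exactly the values whose predecessor is absent, and from each start walk forward through the set to find the segment end; only the starts are sorted.
import Mathlib
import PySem

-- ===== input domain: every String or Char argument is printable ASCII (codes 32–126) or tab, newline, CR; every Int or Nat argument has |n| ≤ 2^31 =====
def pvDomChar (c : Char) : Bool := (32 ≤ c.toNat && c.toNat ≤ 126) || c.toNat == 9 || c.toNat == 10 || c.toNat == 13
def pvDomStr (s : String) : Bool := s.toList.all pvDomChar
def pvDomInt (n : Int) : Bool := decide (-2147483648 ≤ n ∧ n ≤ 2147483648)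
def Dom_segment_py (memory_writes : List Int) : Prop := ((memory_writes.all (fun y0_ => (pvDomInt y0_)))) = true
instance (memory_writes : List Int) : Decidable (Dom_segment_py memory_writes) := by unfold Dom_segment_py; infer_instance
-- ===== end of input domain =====

-- B replaces A's sorted linear merge scan (running start/end state) by hash-set run
-- detection: segment starts are the set elements whose predecessor is absent, and each
-- segment end is found by walking forward through the set; an alternative algorithm.

-- ===== PORT A =====
-- A's for-loop over memory_writes[1:] with state (segments, current_w_start, current_w_end)
def segAloop (segs : PySem.Dict Int Int) (cs ce : Int) : List Int → PySem.Dict Int Int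
  | [] => segs.insert cs (ce - cs)
  | w :: ws =>
    if w > ce then
      segAloop (segs.insert cs (ce - cs)) w (w + 1) ws
    else
      segAloop segs cs (max ce (w + 1)) ws

def segment_py (memory_writes : List Int) : List (Int × Int) :=
  match PySem.List.sorted memory_writes (fun x => x) false with
  | [] => (PySem.Dict.empty (κ := Int) (ν := Int)).items
  | x :: rest => (segAloop PySem.Dict.empty x (x + 1) rest).items

-- ===== PORT B =====
-- B's 'while end + 1 in present: end += 1', made total by fuel = len(present)
-- (sufficient: a run of consecutive members has at most len(present) elements; proved below)
def walkEnd (present : PySem.Set Int) : Nat → Int → Int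
  | 0, e => e
  | n + 1, e => if PySem.Set.contains present (e + 1) then walkEnd present n (e + 1) else e

def segment_py_alt (memory_writes : List Int) : List (Int × Int) :=
  let present := PySem.Set.ofList memory_writes
  let starts := PySem.List.sorted (present.filter (fun x => !(PySem.Set.contains present (x - 1)))) (fun x => x) false
  (starts.foldl (fun segs s => segs.insert s (walkEnd present present.length s - s + 1))
    (PySem.Dict.empty (κ := Int) (ν := Int))).items

-- ===== PRECONDITION & SPEC =====
def Spec_segment_py (memory_writes : List Int) (out : List (Int × Int)) : Prop := out = segment_py_alt memory_writes
instance (memory_writes : List Int) (out : List (Int × Int)) : Decidable (Spec_segment_py memory_writes out) := by unfold Spec_segment_py; infer_instance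

-- ===== CLAIM (what is proved, stated in full; the proofs are below) =====
def Claim_equal_segment_py : Prop := ∀ (memory_writes : List Int), Dom_segment_py memory_writes → Spec_segment_py memory_writes (segment_py memory_writes)

-- ===== LEMMAS AND PROOFS =====

-- adjacent dedup of a sorted list, relative to the previous value (proof-side)
def ddp (prev : Int) : List Int → List Int
  | [] => []
  | w :: ws => if w = prev then ddp prev ws else w :: ddp w ws

-- the run decomposition of a strictly increasing list (proof-side common form)
def runsOf (rs prev : Int) : List Int → List (Int × Int)
  | [] => [(rs, prev - rs + 1)]
  | v :: vs => if v = prev + 1 then runsOf rs v vs else (rs, prev - rs + 1) :: runsOf v v vs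

theorem mem_ddp (l : List Int) (h : l.Pairwise (· ≤ ·)) (prev : Int)
    (hge : ∀ y ∈ l, prev ≤ y) (y : Int) :
    y ∈ ddp prev l ↔ y ∈ l ∧ y ≠ prev := by
  induction l generalizing prev with
  | nil => simp [ddp]
  | cons w ws ih =>
    rcases List.pairwise_cons.mp h with ⟨hw, hws⟩
    by_cases hwp : w = prev
    · subst hwp
      rw [ddp, if_pos rfl, ih hws w hw]
      constructor
      · rintro ⟨hy, hne⟩; exact ⟨List.mem_cons_of_mem _ hy, hne⟩
      · rintro ⟨hy, hne⟩
        exact ⟨(List.mem_cons.mp hy).resolve_left hne, hne⟩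
    · have hplt : prev < w := lt_of_le_of_ne (hge w (List.mem_cons_self)) (fun e => hwp e.symm)
      rw [ddp, if_neg hwp]
      rw [List.mem_cons, List.mem_cons, ih hws w hw]
      constructor
      · rintro (rfl | ⟨hy, hne⟩)
        · exact ⟨Or.inl rfl, by omega⟩
        · have : w ≤ y := hw y hy
          exact ⟨Or.inr hy, by omega⟩
      · rintro ⟨rfl | hy, hne⟩
        · exact Or.inl rfl
        · by_cases hyw : y = w
          · exact Or.inl hyw
          · exact Or.inr ⟨hy, hyw⟩

theorem ddp_pairwise (l : List Int) (h : l.Pairwise (· ≤ ·)) (prev : Int)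
    (hge : ∀ y ∈ l, prev ≤ y) :
    (ddp prev l).Pairwise (· < ·) ∧ ∀ y ∈ ddp prev l, prev < y := by
  induction l generalizing prev with
  | nil => simp [ddp]
  | cons w ws ih =>
    rcases List.pairwise_cons.mp h with ⟨hw, hws⟩
    by_cases hwp : w = prev
    · subst hwp
      rw [ddp, if_pos rfl]
      exact ih hws w hw
    · have hplt : prev < w := lt_of_le_of_ne (hge w (List.mem_cons_self)) (fun e => hwp e.symm)
      rw [ddp, if_neg hwp]
      obtain ⟨hp, hgt⟩ := ih hws w hw
      refine ⟨List.pairwise_cons.mpr ⟨hgt, hp⟩, ?_⟩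
      rintro y hy
      rcases List.mem_cons.mp hy with rfl | hy
      · exact hplt
      · exact lt_trans hplt (hgt y hy)

-- A's loop on the (possibly duplicated) sorted tail, described by runsOf of its adjacent dedup
theorem segAloop_runsOf (l : List Int) (h : l.Pairwise (· ≤ ·)) (prev : Int)
    (hge : ∀ y ∈ l, prev ≤ y) (segs : PySem.Dict Int Int) (cs : Int) :
    segAloop segs cs (prev + 1) l
      = (runsOf cs prev (ddp prev l)).foldl (fun d q => d.insert q.1 q.2) segs := by
  induction l generalizing prev segs cs with
  | nil =>
    have : prev + 1 - cs = prev - cs + 1 := by ring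
    simp [segAloop, ddp, runsOf, this]
  | cons w ws ih =>
    rcases List.pairwise_cons.mp h with ⟨hw, hws⟩
    have hpw : prev ≤ w := hge w (List.mem_cons_self)
    by_cases hwp : w = prev
    · subst hwp
      rw [ddp, if_pos rfl, segAloop]
      have h1 : ¬ w > w + 1 := by omega
      have h2 : max (w + 1) (w + 1) = w + 1 := by omega
      rw [if_neg h1, h2]
      exact ih hws w hw segs cs
    · have hplt : prev < w := lt_of_le_of_ne hpw (fun e => hwp e.symm)
      rw [ddp, if_neg hwp]
      by_cases hgap : w > prev + 1
      · rw [segAloop, if_pos hgap, runsOf, if_neg (by omega), List.foldl_cons]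
        have : prev + 1 - cs = prev - cs + 1 := by ring
        rw [this]
        exact ih hws w hw _ w
      · have hwe : w = prev + 1 := by omega
        subst hwe
        rw [segAloop, if_neg hgap, runsOf, if_pos rfl]
        have h2 : max (prev + 1) (prev + 1 + 1) = prev + 1 + 1 := by omega
        rw [h2]
        exact ih hws (prev + 1) hw segs cs

-- sorted(set(xs)) is the adjacent dedup of sorted(xs)
theorem sorted_set_eq_ddp (xs : List Int) (x : Int) (rest : List Int)
    (h : PySem.List.sorted xs (fun x => x) false = x :: rest) :
    PySem.List.sorted (PySem.Set.ofList xs) (fun x => x) false = x :: ddp x rest := by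
  have hpw : (x :: rest).Pairwise (fun a b : Int => a ≤ b) := by
    have := PySem.List.sorted_pairwise (xs := xs) (key := fun x : Int => x) (κ := Int)
    rwa [h] at this
  rcases List.pairwise_cons.mp hpw with ⟨hx, hrest⟩
  apply PySem.List.sorted_eq_of_perm_of_pairwise_lt
  · have hnd1 : (x :: ddp x rest).Nodup := by
      have := (ddp_pairwise rest hrest x hx)
      exact List.Pairwise.nodup (List.pairwise_cons.mpr ⟨this.2, this.1⟩)
    have hnd2 : (PySem.Set.ofList xs).Nodup := PySem.Set.nodup_ofList xs
    rw [List.perm_ext_iff_of_nodup hnd1 hnd2]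
    intro a
    rw [PySem.Set.mem_ofList]
    have hmem : a ∈ xs ↔ a ∈ x :: rest := by
      rw [← h, PySem.List.mem_sorted]
    rw [List.mem_cons, mem_ddp rest hrest x hx a, hmem, List.mem_cons]
    constructor
    · rintro (rfl | ⟨hy, _⟩)
      · exact Or.inl rfl
      · exact Or.inr hy
    · rintro (rfl | hy)
      · exact Or.inl rfl
      · by_cases hax : a = x
        · exact Or.inl hax
        · exact Or.inr ⟨hy, hax⟩
  · have := ddp_pairwise rest hrest x hx
    exact List.pairwise_cons.mpr ⟨this.2, this.1⟩

-- the starts produced by runsOf are exactly the values whose predecessor is absent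
theorem runsOf_map_fst (p : Int → Bool) (V : List Int) (l : List Int) (rs prev : Int)
    (hp : ∀ x : Int, p x = true ↔ (x - 1) ∉ V)
    (hprev : prev ∈ V) (hpw : (prev :: l).Pairwise (· < ·))
    (hchar : ∀ k : Int, (k ∈ V ∧ prev < k) ↔ k ∈ l) :
    rs :: l.filter p = (runsOf rs prev l).map Prod.fst := by
  induction l generalizing rs prev with
  | nil => simp [runsOf]
  | cons x xs ih =>
    rcases List.pairwise_cons.mp hpw with ⟨hx, hxs⟩
    rcases List.pairwise_cons.mp hxs with ⟨hx2, _⟩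
    have hpx : prev < x := hx x List.mem_cons_self
    have hxV : x ∈ V := ((hchar x).mpr List.mem_cons_self).1
    have hchar' : ∀ k : Int, (k ∈ V ∧ x < k) ↔ k ∈ xs := by
      intro k
      constructor
      · rintro ⟨hkV, hk⟩
        rcases List.mem_cons.mp ((hchar k).mp ⟨hkV, by omega⟩) with rfl | h'
        · omega
        · exact h'
      · intro hk
        exact ⟨((hchar k).mpr (List.mem_cons_of_mem _ hk)).1, hx2 k hk⟩
    by_cases hcons : x = prev + 1
    · rw [runsOf, if_pos hcons]
      have hpfalse : p x = false := by
        rcases Bool.eq_false_or_eq_true (p x) with h' | h'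
        · exfalso
          exact ((hp x).mp h') (by rw [hcons]; simpa using hprev)
        · exact h'
      rw [List.filter_cons, hpfalse]
      simp only [Bool.false_eq_true, if_false]
      exact ih rs x hxV hxs hchar'
    · rw [runsOf, if_neg hcons]
      have hptrue : p x = true := by
        rw [hp x]
        intro hmem
        rcases List.mem_cons.mp ((hchar (x - 1)).mp ⟨hmem, by omega⟩) with h' | h'
        · omega
        · have := hx2 (x - 1) h'; omega
      rw [List.filter_cons, hptrue]
      simp only [if_true, List.map_cons]
      rw [← ih x x hxV hxs hchar']

-- each run of runsOf covers exactly a maximal block of consecutive members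
theorem runsOf_run_spec (V : List Int) (l : List Int) (rs prev : Int)
    (hcov : ∀ k : Int, rs ≤ k → k ≤ prev → k ∈ V) (hrs : rs ≤ prev)
    (hpw : (prev :: l).Pairwise (· < ·))
    (hchar : ∀ k : Int, (k ∈ V ∧ prev < k) ↔ k ∈ l) :
    ∀ q ∈ runsOf rs prev l,
      1 ≤ q.2 ∧ (∀ k : Int, q.1 ≤ k → k ≤ q.1 + q.2 - 1 → k ∈ V) ∧ (q.1 + q.2) ∉ V := by
  induction l generalizing rs prev with
  | nil =>
    intro q hq
    simp only [runsOf, List.mem_singleton] at hq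
    subst hq
    refine ⟨by omega, fun k h1 h2 => hcov k h1 (by omega), ?_⟩
    intro hmem
    have := (hchar (rs + (prev - rs + 1))).mp ⟨hmem, by omega⟩
    simp at this
  | cons x xs ih =>
    rcases List.pairwise_cons.mp hpw with ⟨hx, hxs⟩
    rcases List.pairwise_cons.mp hxs with ⟨hx2, _⟩
    have hpx : prev < x := hx x List.mem_cons_self
    have hxV : x ∈ V := ((hchar x).mpr List.mem_cons_self).1
    have hchar' : ∀ k : Int, (k ∈ V ∧ x < k) ↔ k ∈ xs := by
      intro k
      constructor
      · rintro ⟨hkV, hk⟩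
        rcases List.mem_cons.mp ((hchar k).mp ⟨hkV, by omega⟩) with rfl | h'
        · omega
        · exact h'
      · intro hk
        exact ⟨((hchar k).mpr (List.mem_cons_of_mem _ hk)).1, hx2 k hk⟩
    by_cases hcons : x = prev + 1
    · rw [runsOf, if_pos hcons]
      refine ih rs x ?_ (by omega) hxs hchar'
      intro k h1 h2
      by_cases hk : k ≤ prev
      · exact hcov k h1 hk
      · have : k = x := by omega
        rw [this]; exact hxV
    · rw [runsOf, if_neg hcons]
      intro q hq
      rcases List.mem_cons.mp hq with rfl | hq
      · refine ⟨by omega, fun k h1 h2 => hcov k h1 (by omega), ?_⟩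
        intro hmem
        have hmem' : prev + 1 ∈ V := by
          have he : rs + (prev - rs + 1) = prev + 1 := by ring
          rwa [he] at hmem
        rcases List.mem_cons.mp ((hchar (prev + 1)).mp ⟨hmem', by omega⟩) with h' | h'
        · omega
        · have := hx2 _ h'; omega
      · refine ih x x (fun k h1 h2 => ?_) le_rfl hxs hchar' q hq
        have : k = x := by omega
        rw [this]; exact hxV

-- B's while-loop: from a start s, with the block [s..e] present and e+1 absent, it returns e
theorem walkEnd_eq (S : PySem.Set Int) (s e : Int) (hse : s ≤ e)
    (hin : ∀ k : Int, s ≤ k → k ≤ e → k ∈ S) (hout : (e + 1) ∉ S)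
    (fuel : Nat) (hfuel : e - s ≤ (fuel : Int)) :
    walkEnd S fuel s = e := by
  induction fuel generalizing s with
  | zero =>
    have : s = e := by omega
    rw [this, walkEnd]
  | succ n ih =>
    rw [walkEnd]
    by_cases hs : s = e
    · have : ¬ PySem.Set.contains S (s + 1) = true := by
        simp only [PySem.Set.contains]
        rw [hs]
        simpa using hout
      rw [if_neg this]
      exact hs
    · have hlt : s < e := by omega
      have : PySem.Set.contains S (s + 1) = true := by
        simp only [PySem.Set.contains]
        simpa using hin (s + 1) (by omega) (by omega)
      rw [if_pos this]
      exact ih (s + 1) (by omega) (fun k h1 h2 => hin k (by omega) h2) (by omega)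

-- a block of e - s + 1 consecutive members bounds the needed fuel by the set's size
theorem block_le_length (S : List Int) (s e : Int) (hse : s ≤ e)
    (hin : ∀ k : Int, s ≤ k → k ≤ e → k ∈ S) :
    e - s ≤ (S.length : Int) := by
  set L : List Int := (List.range (e - s + 1).toNat).map (fun i : Nat => s + (i : Int)) with hLdef
  have hL : L.Nodup := by
    refine List.Nodup.map (fun a b hab => ?_) (List.nodup_range)
    have hab' : s + (a : Int) = s + (b : Int) := hab
    omega
  have hsub : L ⊆ S := by
    intro y hy
    rw [hLdef] at hy
    rcases List.mem_map.mp hy with ⟨i, hi, rfl⟩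
    rw [List.mem_range] at hi
    exact hin _ (by omega) (by omega)
  have hlen := (List.subperm_of_subset hL hsub).length_le
  rw [hLdef, List.length_map, List.length_range] at hlen
  omega

-- ===== VERDICT (by name: the statement is the Claim_ definition above) =====
theorem segment_py_spec : Claim_equal_segment_py := by
  intro xs _
  unfold Spec_segment_py
  cases h : PySem.List.sorted xs (fun x => x) false with
  | nil =>
    have hxs : xs = [] := (PySem.List.sorted_eq_nil_iff xs (fun x => x) false).mp h
    subst hxs
    rfl
  | cons x rest =>
    have hpw : (x :: rest).Pairwise (fun a b : Int => a ≤ b) := by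
      have := PySem.List.sorted_pairwise (xs := xs) (key := fun x : Int => x) (κ := Int)
      rwa [h] at this
    rcases List.pairwise_cons.mp hpw with ⟨hx, hrest⟩
    -- notation
    set S := PySem.Set.ofList xs with hS
    have hVdef : PySem.List.sorted S (fun x => x) false = x :: ddp x rest :=
      sorted_set_eq_ddp xs x rest h
    have hddp := ddp_pairwise rest hrest x hx
    have hVpw : (x :: ddp x rest).Pairwise (fun a b : Int => a < b) :=
      List.pairwise_cons.mpr ⟨hddp.2, hddp.1⟩
    have hVS : ∀ k : Int, k ∈ (x :: ddp x rest) ↔ k ∈ S := by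
      intro k
      rw [← hVdef, PySem.List.mem_sorted]
    have hxS : x ∈ S := (hVS x).mp List.mem_cons_self
    have hchar : ∀ k : Int, (k ∈ (x :: ddp x rest) ∧ x < k) ↔ k ∈ ddp x rest := by
      intro k
      constructor
      · rintro ⟨hk, hlt⟩
        rcases List.mem_cons.mp hk with rfl | hk
        · omega
        · exact hk
      · intro hk
        exact ⟨List.mem_cons_of_mem _ hk, hddp.2 k hk⟩
    -- A side
    rw [segment_py, h]
    show (segAloop PySem.Dict.empty x (x + 1) rest).items = segment_py_alt xs
    rw [segAloop_runsOf rest hrest x hx PySem.Dict.empty x]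
    -- B side
    rw [segment_py_alt]
    set p : Int → Bool := fun y => !(PySem.Set.contains S (y - 1)) with hpdef
    show _ = ((PySem.List.sorted (S.filter p) (fun y => y) false).foldl
        (fun segs s => segs.insert s (walkEnd S S.length s - s + 1)) PySem.Dict.empty).items
    -- the sorted filtered set is the filter of the sorted set
    have hp : ∀ y : Int, p y = true ↔ (y - 1) ∉ (x :: ddp x rest) := by
      intro y
      rw [hpdef]
      simp only [PySem.Set.contains, Bool.not_eq_true']
      rw [← Bool.not_eq_true]
      constructor
      · intro h1 h2
        exact h1 (by simpa using (hVS (y - 1)).mp h2)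
      · intro h1 h2
        exact h1 ((hVS (y - 1)).mpr (by simpa using h2))
    have hsortfilter : PySem.List.sorted (S.filter p) (fun y => y) false
        = (x :: ddp x rest).filter p := by
      apply PySem.List.sorted_eq_of_perm_of_pairwise_lt
      · refine List.Perm.filter p ?_
        have := PySem.List.sorted_perm (xs := S) (key := fun y : Int => y) (rev := false)
        rw [hVdef] at this
        exact this
      · exact List.Pairwise.filter p hVpw
    have hpx : p x = true := by
      rw [hp x]
      intro hmem
      rcases List.mem_cons.mp hmem with h' | h'
      · omega
      · have := hddp.2 _ h'; omega
    have hstarts : PySem.List.sorted (S.filter p) (fun y => y) false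
        = (runsOf x x (ddp x rest)).map Prod.fst := by
      rw [hsortfilter, List.filter_cons, hpx]
      simp only [if_true]
      exact runsOf_map_fst p (x :: ddp x rest) (ddp x rest) x x hp
        (List.mem_cons_self) hVpw hchar
    rw [hstarts]
    -- fold over the starts = fold over the runs
    simp only [List.foldl_map]
    have hcovx : ∀ k : Int, x ≤ k → k ≤ x → k ∈ x :: ddp x rest := by
      intro k h1 h2
      have hkx : k = x := le_antisymm h2 h1
      subst hkx
      exact List.mem_cons_self
    have hrun := runsOf_run_spec (x :: ddp x rest) (ddp x rest) x x hcovx le_rfl hVpw hchar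
    have hfold : List.foldl
        (fun (d : PySem.Dict Int Int) (q : Int × Int) =>
          d.insert q.1 (walkEnd S S.length q.1 - q.1 + 1))
        PySem.Dict.empty (runsOf x x (ddp x rest))
        = List.foldl (fun (d : PySem.Dict Int Int) (q : Int × Int) => d.insert q.1 q.2)
        PySem.Dict.empty (runsOf x x (ddp x rest)) := by
      apply PySem.List.foldl_congr_mem
      intro acc q hq
      obtain ⟨h1, h2, h3⟩ := hrun q hq
      have hinS : ∀ k : Int, q.1 ≤ k → k ≤ q.1 + q.2 - 1 → k ∈ S := by
        intro k ha hb
        exact (hVS k).mp (h2 k ha hb)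
      have houtS : (q.1 + q.2 - 1) + 1 ∉ S := by
        intro hmem
        exact h3 ((hVS _).mpr (by simpa using hmem))
      have hfuel : (q.1 + q.2 - 1) - q.1 ≤ (S.length : Int) :=
        block_le_length S q.1 (q.1 + q.2 - 1) (by omega) hinS
      have hwalk := walkEnd_eq S q.1 (q.1 + q.2 - 1) (by omega) hinS
        (by simpa using houtS) S.length hfuel
      rw [hwalk]
      congr 1
      omega
    rw [hfold]
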